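-- pv_equiv track=rewrite | github.com/wcf000/tracking-cookies-browser-fingerprinting | scripts/visualize.py | categorize_cookie
-- ===== SOURCE A (Python) =====
-- def categorize_cookie(cookie):
--     """Categorize a cookie based on its name and domain."""
--     name = cookie.get('name', '').lower()
--     domain = cookie.get('domain', '').lower()
--
--     # Analytics cookies
--     if ('_ga' in name or 'analytics' in name or '_utm' in name or
--         'google-analytics' in domain or 'hotjar' in domain):
--         return 'Analytics'
--
--     # Advertising cookies
--     if ('ads' in name or 'advert' in name or '_fbp' in name or
--         'doubleclick' in domain or 'ad.' in domain or
--         'adnxs' in domain or 'adsystem' in domain):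
--         return 'Advertising'
--
--     # Session/functional cookies
--     if ('session' in name or 'csrf' in name or
--         'auth' in name or 'login' in name):
--         return 'Session/Authentication'
--
--     # Social media cookies
--     if ('facebook' in domain or 'twitter' in domain or
--         'linkedin' in domain or 'instagram' in domain or
--         'share' in name or 'social' in name):
--         return 'Social Media'
--
--     # Preferences cookies
--     if ('pref' in name or 'setting' in name or
--         'consent' in name or 'notice' in name):
--         return 'Preferences'
--
--     # Performance/Technical cookies
--     if ('cache' in name or '__cf' in name or 'load' in name or
--         'perf' in name or 'cloudflare' in domain):
--         return 'Performance'
--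
--     # Known trackers
--     known_trackers = [
--         'doubleclick.net', 'google-analytics.com', 'facebook.net', 'facebook.com',
--         'adnxs.com', 'amazon-adsystem.com', 'criteo.com', 'scorecardresearch.com',
--         'googletagmanager.com', 'advertising.com', 'googlesyndication.com',
--         'adsrvr.org', 'demdex.net', 'rlcdn.com', 'adition.com', 'hotjar.com',
--         'quantserve.com', 'rubiconproject.com', 'mathtag.com', 'pubmatic.com',
--         'casalemedia.com', 'moatads.com', 'addthis.com', 'taboola.com',
--         'outbrain.com', 'sharethis.com', 'optimizely.com'
--     ]
--
--     if any(tracker in domain for tracker in known_trackers):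
--         return 'Tracking Network'
--
--     # Default fallback
--     return 'Other Tracker'
-- ===== SOURCE B (Python) =====
-- # B: flat (priority, field, substring) pattern list; evaluate every pattern and
-- # keep the minimum matched priority (no early return), then index a category table.
-- _CATEGORIES = ['Analytics', 'Advertising', 'Session/Authentication', 'Social Media',
--                'Preferences', 'Performance', 'Tracking Network', 'Other Tracker']
--
-- _PATTERNS = [
--     (0, 'n', '_ga'), (0, 'n', 'analytics'), (0, 'n', '_utm'),
--     (0, 'd', 'google-analytics'), (0, 'd', 'hotjar'),
--     (1, 'n', 'ads'), (1, 'n', 'advert'), (1, 'n', '_fbp'),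
--     (1, 'd', 'doubleclick'), (1, 'd', 'ad.'), (1, 'd', 'adnxs'), (1, 'd', 'adsystem'),
--     (2, 'n', 'session'), (2, 'n', 'csrf'), (2, 'n', 'auth'), (2, 'n', 'login'),
--     (3, 'd', 'facebook'), (3, 'd', 'twitter'), (3, 'd', 'linkedin'), (3, 'd', 'instagram'),
--     (3, 'n', 'share'), (3, 'n', 'social'),
--     (4, 'n', 'pref'), (4, 'n', 'setting'), (4, 'n', 'consent'), (4, 'n', 'notice'),
--     (5, 'n', 'cache'), (5, 'n', '__cf'), (5, 'n', 'load'), (5, 'n', 'perf'),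
--     (5, 'd', 'cloudflare'),
--     (6, 'd', 'doubleclick.net'), (6, 'd', 'google-analytics.com'), (6, 'd', 'facebook.net'),
--     (6, 'd', 'facebook.com'), (6, 'd', 'adnxs.com'), (6, 'd', 'amazon-adsystem.com'),
--     (6, 'd', 'criteo.com'), (6, 'd', 'scorecardresearch.com'), (6, 'd', 'googletagmanager.com'),
--     (6, 'd', 'advertising.com'), (6, 'd', 'googlesyndication.com'), (6, 'd', 'adsrvr.org'),
--     (6, 'd', 'demdex.net'), (6, 'd', 'rlcdn.com'), (6, 'd', 'adition.com'), (6, 'd', 'hotjar.com'),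
--     (6, 'd', 'quantserve.com'), (6, 'd', 'rubiconproject.com'), (6, 'd', 'mathtag.com'),
--     (6, 'd', 'pubmatic.com'), (6, 'd', 'casalemedia.com'), (6, 'd', 'moatads.com'),
--     (6, 'd', 'addthis.com'), (6, 'd', 'taboola.com'), (6, 'd', 'outbrain.com'),
--     (6, 'd', 'sharethis.com'), (6, 'd', 'optimizely.com'),
-- ]
--
--
-- def categorize_cookie(cookie):
--     """Categorize a cookie: minimum-priority match over a flat pattern list."""
--     name = cookie.get('name', '').lower()
--     domain = cookie.get('domain', '').lower()
--     best = min((p for p, f, s in _PATTERNS if s in (name if f == 'n' else domain)),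
--                default=len(_CATEGORIES) - 1)
--     return _CATEGORIES[best]
-- ===== Notes on version B (the rewrite author's own statement) =====
-- stated objective: alternative
-- what changed: A's six ordered early-return if-blocks plus a trailing known-trackers any() are replaced by a flat list of (priority, field, substring) patterns that is evaluated in full, taking the minimum matched priority and indexing a category table (aggregation instead of first-match control flow).
import Mathlib
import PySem

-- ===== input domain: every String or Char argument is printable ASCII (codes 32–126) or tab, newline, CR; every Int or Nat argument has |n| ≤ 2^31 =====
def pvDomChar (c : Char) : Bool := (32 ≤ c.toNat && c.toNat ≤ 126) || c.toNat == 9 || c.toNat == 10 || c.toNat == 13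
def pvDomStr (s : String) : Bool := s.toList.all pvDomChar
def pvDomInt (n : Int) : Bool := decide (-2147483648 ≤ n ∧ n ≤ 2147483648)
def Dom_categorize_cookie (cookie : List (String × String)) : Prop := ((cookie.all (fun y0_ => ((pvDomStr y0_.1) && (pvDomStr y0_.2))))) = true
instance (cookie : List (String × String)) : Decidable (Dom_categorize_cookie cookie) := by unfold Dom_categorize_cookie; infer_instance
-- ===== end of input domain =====

-- B replaces A's ordered early-return if-blocks by a flat (priority, field, substring)
-- pattern list: every pattern is tested, the minimum matched priority indexes a category
-- table (objective: alternative; same cost).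


-- ===== PORT A =====
def categorize_cookie (cookie : List (String × String)) : String :=
  let name := PySem.Str.lower ((PySem.Dict.mk cookie).getD "name" "")
  let domain := PySem.Str.lower ((PySem.Dict.mk cookie).getD "domain" "")
  if PySem.Str.isIn "_ga" name || PySem.Str.isIn "analytics" name || PySem.Str.isIn "_utm" name ||
      PySem.Str.isIn "google-analytics" domain || PySem.Str.isIn "hotjar" domain then "Analytics"
  else if PySem.Str.isIn "ads" name || PySem.Str.isIn "advert" name || PySem.Str.isIn "_fbp" name ||
      PySem.Str.isIn "doubleclick" domain || PySem.Str.isIn "ad." domain ||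
      PySem.Str.isIn "adnxs" domain || PySem.Str.isIn "adsystem" domain then "Advertising"
  else if PySem.Str.isIn "session" name || PySem.Str.isIn "csrf" name ||
      PySem.Str.isIn "auth" name || PySem.Str.isIn "login" name then "Session/Authentication"
  else if PySem.Str.isIn "facebook" domain || PySem.Str.isIn "twitter" domain ||
      PySem.Str.isIn "linkedin" domain || PySem.Str.isIn "instagram" domain ||
      PySem.Str.isIn "share" name || PySem.Str.isIn "social" name then "Social Media"
  else if PySem.Str.isIn "pref" name || PySem.Str.isIn "setting" name ||
      PySem.Str.isIn "consent" name || PySem.Str.isIn "notice" name then "Preferences"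
  else if PySem.Str.isIn "cache" name || PySem.Str.isIn "__cf" name || PySem.Str.isIn "load" name ||
      PySem.Str.isIn "perf" name || PySem.Str.isIn "cloudflare" domain then "Performance"
  else
    let known_trackers : List String := [
      "doubleclick.net", "google-analytics.com", "facebook.net", "facebook.com",
      "adnxs.com", "amazon-adsystem.com", "criteo.com", "scorecardresearch.com",
      "googletagmanager.com", "advertising.com", "googlesyndication.com",
      "adsrvr.org", "demdex.net", "rlcdn.com", "adition.com", "hotjar.com",
      "quantserve.com", "rubiconproject.com", "mathtag.com", "pubmatic.com",
      "casalemedia.com", "moatads.com", "addthis.com", "taboola.com",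
      "outbrain.com", "sharethis.com", "optimizely.com"]
    if known_trackers.any (fun tracker => PySem.Str.isIn tracker domain) then "Tracking Network"
    else "Other Tracker"

-- ===== PORT B ===== (flat pattern list, minimum matched priority, category table)
def pvCategories : List String :=
  ["Analytics", "Advertising", "Session/Authentication", "Social Media",
   "Preferences", "Performance", "Tracking Network", "Other Tracker"]

def pvPatterns : List (Nat × String × String) := [
  (0, "n", "_ga"), (0, "n", "analytics"), (0, "n", "_utm"),
  (0, "d", "google-analytics"), (0, "d", "hotjar"),
  (1, "n", "ads"), (1, "n", "advert"), (1, "n", "_fbp"),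
  (1, "d", "doubleclick"), (1, "d", "ad."), (1, "d", "adnxs"), (1, "d", "adsystem"),
  (2, "n", "session"), (2, "n", "csrf"), (2, "n", "auth"), (2, "n", "login"),
  (3, "d", "facebook"), (3, "d", "twitter"), (3, "d", "linkedin"), (3, "d", "instagram"),
  (3, "n", "share"), (3, "n", "social"),
  (4, "n", "pref"), (4, "n", "setting"), (4, "n", "consent"), (4, "n", "notice"),
  (5, "n", "cache"), (5, "n", "__cf"), (5, "n", "load"), (5, "n", "perf"),
  (5, "d", "cloudflare"),
  (6, "d", "doubleclick.net"), (6, "d", "google-analytics.com"), (6, "d", "facebook.net"),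
  (6, "d", "facebook.com"), (6, "d", "adnxs.com"), (6, "d", "amazon-adsystem.com"),
  (6, "d", "criteo.com"), (6, "d", "scorecardresearch.com"), (6, "d", "googletagmanager.com"),
  (6, "d", "advertising.com"), (6, "d", "googlesyndication.com"), (6, "d", "adsrvr.org"),
  (6, "d", "demdex.net"), (6, "d", "rlcdn.com"), (6, "d", "adition.com"), (6, "d", "hotjar.com"),
  (6, "d", "quantserve.com"), (6, "d", "rubiconproject.com"), (6, "d", "mathtag.com"),
  (6, "d", "pubmatic.com"), (6, "d", "casalemedia.com"), (6, "d", "moatads.com"),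
  (6, "d", "addthis.com"), (6, "d", "taboola.com"), (6, "d", "outbrain.com"),
  (6, "d", "sharethis.com"), (6, "d", "optimizely.com")]

-- min over the filtered generator with a default, ported as a fold keeping the minimum
def categorize_cookie_alt (cookie : List (String × String)) : String :=
  let name := PySem.Str.lower ((PySem.Dict.mk cookie).getD "name" "")
  let domain := PySem.Str.lower ((PySem.Dict.mk cookie).getD "domain" "")
  let best := pvPatterns.foldl
    (fun m t => if PySem.Str.isIn t.2.2 (if t.2.1 == "n" then name else domain) then min m t.1 else m)
    (pvCategories.length - 1)
  -- _CATEGORIES[best]: best is always in range (0 ≤ best ≤ 7)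
  (PySem.List.pyGet? pvCategories (best : Int)).getD ""

-- ===== PRECONDITION & SPEC =====
def Spec_categorize_cookie (cookie : List (String × String)) (out : String) : Prop := out = categorize_cookie_alt cookie
instance (cookie : List (String × String)) (out : String) : Decidable (Spec_categorize_cookie cookie out) := by unfold Spec_categorize_cookie; infer_instance

-- ===== CLAIM (what is proved, stated in full; the proofs are below) =====
def Claim_equal_categorize_cookie : Prop := ∀ (cookie : List (String × String)), Dom_categorize_cookie cookie → Spec_categorize_cookie cookie (categorize_cookie cookie)

-- ===== LEMMAS AND PROOFS =====

-- the seven constant-priority blocks of pvPatterns, written out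
def pvG0 : List (Nat × String × String) := [(0, "n", "_ga"), (0, "n", "analytics"), (0, "n", "_utm"), (0, "d", "google-analytics"), (0, "d", "hotjar")]
def pvG1 : List (Nat × String × String) := [(1, "n", "ads"), (1, "n", "advert"), (1, "n", "_fbp"), (1, "d", "doubleclick"), (1, "d", "ad."), (1, "d", "adnxs"), (1, "d", "adsystem")]
def pvG2 : List (Nat × String × String) := [(2, "n", "session"), (2, "n", "csrf"), (2, "n", "auth"), (2, "n", "login")]
def pvG3 : List (Nat × String × String) := [(3, "d", "facebook"), (3, "d", "twitter"), (3, "d", "linkedin"), (3, "d", "instagram"), (3, "n", "share"), (3, "n", "social")]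
def pvG4 : List (Nat × String × String) := [(4, "n", "pref"), (4, "n", "setting"), (4, "n", "consent"), (4, "n", "notice")]
def pvG5 : List (Nat × String × String) := [(5, "n", "cache"), (5, "n", "__cf"), (5, "n", "load"), (5, "n", "perf"), (5, "d", "cloudflare")]
def pvG6 : List (Nat × String × String) := [(6, "d", "doubleclick.net"), (6, "d", "google-analytics.com"), (6, "d", "facebook.net"), (6, "d", "facebook.com"), (6, "d", "adnxs.com"), (6, "d", "amazon-adsystem.com"), (6, "d", "criteo.com"), (6, "d", "scorecardresearch.com"), (6, "d", "googletagmanager.com"), (6, "d", "advertising.com"), (6, "d", "googlesyndication.com"), (6, "d", "adsrvr.org"), (6, "d", "demdex.net"), (6, "d", "rlcdn.com"), (6, "d", "adition.com"), (6, "d", "hotjar.com"), (6, "d", "quantserve.com"), (6, "d", "rubiconproject.com"), (6, "d", "mathtag.com"), (6, "d", "pubmatic.com"), (6, "d", "casalemedia.com"), (6, "d", "moatads.com"), (6, "d", "addthis.com"), (6, "d", "taboola.com"), (6, "d", "outbrain.com"), (6, "d", "sharethis.com"), (6, "d", "optimizely.com")]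

def pvStep (b : Bool) (p acc : Nat) : Nat := if b then min acc p else acc

-- Folding the min-update over a block whose elements all carry priority p just lowers
-- the accumulator to `min acc p` exactly when some element of the block matches.
theorem pv_foldl_block {α : Type} (f : α → Bool) (pr : α → Nat) (p : Nat)
    (l : List α) (h : ∀ t ∈ l, pr t = p) (acc : Nat) :
    l.foldl (fun m t => if f t then min m (pr t) else m) acc
      = if l.any f then min acc p else acc := by
  induction l generalizing acc with
  | nil => simp
  | cons hd tl ih =>
    have hhd : pr hd = p := h hd (by simp)
    have htl : ∀ t ∈ tl, pr t = p := fun t ht => h t (by simp [ht])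
    by_cases hf : f hd = true
    · rw [List.foldl_cons, if_pos hf, hhd, ih htl]
      cases htl' : tl.any f <;> simp [List.any_cons, hf, htl']
    · have hf' : f hd = false := by simpa using hf
      rw [List.foldl_cons, if_neg hf, ih htl]
      simp [List.any_cons, hf']

-- both result shapes as a function of the seven block-match booleans
theorem pv_chain : ∀ (b0 b1 b2 b3 b4 b5 b6 : Bool),
    (if b0 then "Analytics" else if b1 then "Advertising"
     else if b2 then "Session/Authentication" else if b3 then "Social Media"
     else if b4 then "Preferences" else if b5 then "Performance"
     else if b6 then "Tracking Network" else "Other Tracker") =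
    ((PySem.List.pyGet? pvCategories
        ((pvStep b6 6 (pvStep b5 5 (pvStep b4 4 (pvStep b3 3 (pvStep b2 2 (pvStep b1 1
          (pvStep b0 0 (pvCategories.length - 1)))))))) : Int)).getD "") := by
  intro b0 b1 b2 b3 b4 b5 b6
  cases b0 <;> cases b1 <;> cases b2 <;> cases b3 <;> cases b4 <;> cases b5 <;> cases b6 <;> rfl

set_option maxRecDepth 8000 in
set_option maxHeartbeats 1600000 in
theorem pv_ports_agree (cookie : List (String × String)) :
    categorize_cookie cookie = categorize_cookie_alt cookie := by
  unfold categorize_cookie categorize_cookie_alt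
  set name := PySem.Str.lower ((PySem.Dict.mk cookie).getD "name" "") with hname
  set domain := PySem.Str.lower ((PySem.Dict.mk cookie).getD "domain" "") with hdomain
  rw [show pvPatterns = pvG0 ++ pvG1 ++ pvG2 ++ pvG3 ++ pvG4 ++ pvG5 ++ pvG6 from rfl]
  simp only [List.foldl_append]
  rw [pv_foldl_block _ Prod.fst 6 pvG6 (by decide),
      pv_foldl_block _ Prod.fst 5 pvG5 (by decide),
      pv_foldl_block _ Prod.fst 4 pvG4 (by decide),
      pv_foldl_block _ Prod.fst 3 pvG3 (by decide),
      pv_foldl_block _ Prod.fst 2 pvG2 (by decide),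
      pv_foldl_block _ Prod.fst 1 pvG1 (by decide),
      pv_foldl_block _ Prod.fst 0 pvG0 (by decide)]
  simp only [pvG0, pvG1, pvG2, pvG3, pvG4, pvG5, pvG6, List.any_cons, List.any_nil,
    Bool.or_false, Bool.or_assoc,
    show ∀ a b : String, (if (("n" : String) == "n") = true then a else b) = a from fun a b => rfl,
    show ∀ a b : String, (if (("d" : String) == "n") = true then a else b) = b from fun a b => rfl]
  exact pv_chain _ _ _ _ _ _ _

-- ===== VERDICT (by name: the statement is the Claim_ definition above) =====
theorem categorize_cookie_spec : Claim_equal_categorize_cookie := by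
  intro cookie _
  unfold Spec_categorize_cookie
  exact pv_ports_agree cookie
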